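-- pv_equiv track=rewrite | github.com/gorlatoff/gorlatoff.github.io | music_math/applydiff_win.py | reduce_hunk_lines
-- ===== SOURCE A (Python) =====
-- from typing import List, Tuple, Optional
--
-- HunkLine = Tuple[str, str, bool]
--
-- def reduce_hunk_lines(h_lines: List[HunkLine], drop_left_ctx: int, drop_right_ctx: int) -> List[HunkLine]:
--     if drop_left_ctx == 0 and drop_right_ctx == 0:
--         return h_lines
--     ctx_idx = [i for i, (op, _, _) in enumerate(h_lines) if op == ' ']
--     to_drop = set()
--     for k in range(min(drop_left_ctx, len(ctx_idx))):
--         to_drop.add(ctx_idx[k])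
--     for k in range(1, min(drop_right_ctx, len(ctx_idx)) + 1):
--         to_drop.add(ctx_idx[-k])
--     return [hl for j, hl in enumerate(h_lines) if j not in to_drop]
-- ===== SOURCE B (Python) =====
-- from typing import List, Tuple
--
-- HunkLine = Tuple[str, str, bool]
--
-- def reduce_hunk_lines(h_lines: List[HunkLine], drop_left_ctx: int, drop_right_ctx: int) -> List[HunkLine]:
--     if drop_left_ctx == 0 and drop_right_ctx == 0:
--         return h_lines
--     n_ctx = sum(1 for op, _, _ in h_lines if op == ' ')
--     lo = min(drop_left_ctx, n_ctx)
--     hi = n_ctx - min(drop_right_ctx, n_ctx)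
--     out = []
--     r = 0
--     for hl in h_lines:
--         if hl[0] == ' ':
--             if lo <= r < hi:
--                 out.append(hl)
--             r += 1
--         else:
--             out.append(hl)
--     return out
-- ===== Notes on version B (the rewrite author's own statement) =====
-- stated objective: alternative
-- what changed: B replaces A's context-index list plus drop-set construction and index-membership filter by a one-pass filter keeping only a context count and a running context rank compared against a [lo,hi) window.
import Mathlib
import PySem

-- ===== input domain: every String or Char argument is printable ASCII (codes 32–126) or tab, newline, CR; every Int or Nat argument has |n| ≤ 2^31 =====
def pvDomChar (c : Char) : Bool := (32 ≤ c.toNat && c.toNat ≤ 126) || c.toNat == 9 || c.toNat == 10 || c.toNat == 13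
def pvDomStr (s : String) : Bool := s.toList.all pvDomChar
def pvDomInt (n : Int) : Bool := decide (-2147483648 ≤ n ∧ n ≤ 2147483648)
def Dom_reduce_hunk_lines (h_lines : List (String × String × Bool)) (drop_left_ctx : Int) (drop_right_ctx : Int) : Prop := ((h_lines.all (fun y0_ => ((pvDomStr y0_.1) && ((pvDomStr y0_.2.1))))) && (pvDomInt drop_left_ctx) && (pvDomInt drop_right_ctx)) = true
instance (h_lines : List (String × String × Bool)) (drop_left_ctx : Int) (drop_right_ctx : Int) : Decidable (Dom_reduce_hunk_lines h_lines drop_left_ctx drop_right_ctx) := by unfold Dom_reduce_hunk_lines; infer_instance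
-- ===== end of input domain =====

-- B replaces A's context-index list + drop-set by a one-pass running-context-rank filter (alternative decomposition, same cost).

-- ===== PORT A =====
-- literal port of A; ctx_idx[k] / ctx_idx[-k] are always in range (min clamps), so pyGetD is exact here
def reduce_hunk_lines (h_lines : List (String × String × Bool)) (drop_left_ctx : Int) (drop_right_ctx : Int) : List (String × String × Bool) :=
  if drop_left_ctx = 0 ∧ drop_right_ctx = 0 then h_lines
  else
    let ctx_idx : List Int :=
      ((PySem.List.enumerate h_lines 0).filter (fun p => p.2.1 == " ")).map (·.1)
    let to_drop : PySem.Set Int := PySem.Set.empty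
    let to_drop :=
      (PySem.List.pyRange 0 (min drop_left_ctx (ctx_idx.length : Int)) 1).foldl
        (fun s k => PySem.Set.add s (PySem.List.pyGetD ctx_idx k 0)) to_drop
    let to_drop :=
      (PySem.List.pyRange 1 (min drop_right_ctx (ctx_idx.length : Int) + 1) 1).foldl
        (fun s k => PySem.Set.add s (PySem.List.pyGetD ctx_idx (-k) 0)) to_drop
    ((PySem.List.enumerate h_lines 0).filter (fun p => ! to_drop.contains p.1)).map (·.2)

-- ===== PORT B =====
def reduce_hunk_lines_alt (h_lines : List (String × String × Bool)) (drop_left_ctx : Int) (drop_right_ctx : Int) : List (String × String × Bool) :=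
  if drop_left_ctx = 0 ∧ drop_right_ctx = 0 then h_lines
  else
    let n_ctx : Int := h_lines.foldl (fun c hl => if hl.1 == " " then c + 1 else c) 0
    let lo : Int := min drop_left_ctx n_ctx
    let hi : Int := n_ctx - min drop_right_ctx n_ctx
    (h_lines.foldl
      (fun (st : Int × List (String × String × Bool)) hl =>
        if hl.1 == " " then
          (st.1 + 1, if lo ≤ st.1 ∧ st.1 < hi then st.2 ++ [hl] else st.2)
        else
          (st.1, st.2 ++ [hl]))
      (0, [])).2

-- ===== PRECONDITION & SPEC =====
def Spec_reduce_hunk_lines (h_lines : List (String × String × Bool)) (drop_left_ctx : Int) (drop_right_ctx : Int) (out : List (String × String × Bool)) : Prop := out = reduce_hunk_lines_alt h_lines drop_left_ctx drop_right_ctx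
instance (h_lines : List (String × String × Bool)) (drop_left_ctx : Int) (drop_right_ctx : Int) (out : List (String × String × Bool)) : Decidable (Spec_reduce_hunk_lines h_lines drop_left_ctx drop_right_ctx out) := by unfold Spec_reduce_hunk_lines; infer_instance

-- ===== CLAIM (what is proved, stated in full; the proofs are below) =====
def Claim_equal_reduce_hunk_lines : Prop := ∀ (h_lines : List (String × String × Bool)) (drop_left_ctx : Int) (drop_right_ctx : Int), Dom_reduce_hunk_lines h_lines drop_left_ctx drop_right_ctx → Spec_reduce_hunk_lines h_lines drop_left_ctx drop_right_ctx (reduce_hunk_lines h_lines drop_left_ctx drop_right_ctx)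

-- ===== LEMMAS AND PROOFS =====

-- proof-only helpers
def pvCtx (hl : String × String × Bool) : Bool := hl.1 == " "

def pvRankFilter (lo hi r : Int) : List (String × String × Bool) → List (String × String × Bool)
  | [] => []
  | hl :: rest =>
    if pvCtx hl then
      (if lo ≤ r ∧ r < hi then hl :: pvRankFilter lo hi (r + 1) rest
       else pvRankFilter lo hi (r + 1) rest)
    else hl :: pvRankFilter lo hi r rest

def pvCtxIdx (s : Int) (xs : List (String × String × Bool)) : List Int :=
  ((PySem.List.enumerate xs s).filter (fun p => p.2.1 == " ")).map (·.1)

theorem pvCtxIdx_nil (s : Int) : pvCtxIdx s [] = [] := rfl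

theorem pvCtxIdx_cons (s : Int) (x : String × String × Bool) (xs : List (String × String × Bool)) :
    pvCtxIdx s (x :: xs) = (if pvCtx x then [s] else []) ++ pvCtxIdx (s + 1) xs := by
  simp [pvCtxIdx, PySem.List.enumerate_cons, List.filter_cons, pvCtx]
  split <;> simp

theorem pvCtxIdx_length (xs : List (String × String × Bool)) (s : Int) :
    (pvCtxIdx s xs).length = xs.countP pvCtx := by
  induction xs generalizing s with
  | nil => rfl
  | cons x xs ih =>
    rw [pvCtxIdx_cons]
    by_cases h : pvCtx x = true <;> simp [h, List.countP_cons, ih]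

-- the rank-r context line of xs sits at ctxIdx position r with value s + (its index)
theorem pvCtxIdx_of_rank (xs : List (String × String × Bool)) (s : Int) (r : Nat)
    (hr : r < (pvCtxIdx s xs).length) :
    ∃ (j : Nat) (hj : j < xs.length), (pvCtxIdx s xs)[r]? = some (s + (j : Int)) ∧
      pvCtx (xs[j]'hj) = true ∧ (xs.take j).countP pvCtx = r := by
  induction xs generalizing s r with
  | nil => simp [pvCtxIdx_nil] at hr
  | cons x xs ih =>
    rw [pvCtxIdx_length] at hr
    by_cases h : pvCtx x = true
    · cases r with
      | zero =>
        refine ⟨0, by simp, ?_, h, by simp⟩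
        rw [pvCtxIdx_cons]; simp [h]
      | succ r =>
        have hr' : r < (pvCtxIdx (s + 1) xs).length := by
          rw [pvCtxIdx_length]; simp [List.countP_cons, h] at hr; omega
        obtain ⟨j, hj, hv, hc, hcount⟩ := ih (s + 1) r hr'
        refine ⟨j + 1, by simp only [List.length_cons]; omega, ?_, by simpa using hc, ?_⟩
        · rw [pvCtxIdx_cons]; simp [h, hv]; ring
        · simp [List.countP_cons, h, hcount]
    · have hr' : r < (pvCtxIdx (s + 1) xs).length := by
        rw [pvCtxIdx_length]; simp [List.countP_cons, h] at hr; omega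
      obtain ⟨j, hj, hv, hc, hcount⟩ := ih (s + 1) r hr'
      refine ⟨j + 1, by simp only [List.length_cons]; omega, ?_, by simpa using hc, ?_⟩
      · rw [pvCtxIdx_cons]; simp [h, hv]; ring
      · simp [List.countP_cons, h, hcount]

theorem pvCtxIdx_rank_of_idx (xs : List (String × String × Bool)) (s : Int) (j : Nat)
    (hj : j < xs.length) (hc : pvCtx (xs[j]'hj) = true) :
    (xs.take j).countP pvCtx < (pvCtxIdx s xs).length ∧
      (pvCtxIdx s xs)[(xs.take j).countP pvCtx]? = some (s + (j : Int)) := by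
  induction xs generalizing s j with
  | nil => simp at hj
  | cons x xs ih =>
    cases j with
    | zero =>
      simp only [List.getElem_cons_zero] at hc
      rw [pvCtxIdx_cons]
      simp [hc]
    | succ j =>
      simp only [List.getElem_cons_succ] at hc
      obtain ⟨hr, hv⟩ := ih (s + 1) j (by simp only [List.length_cons] at hj; omega) hc
      rw [pvCtxIdx_cons]
      rw [pvCtxIdx_length] at hr
      constructor
      · by_cases h : pvCtx x = true <;>
          simp [h, List.countP_cons, pvCtxIdx_length] <;> omega
      · by_cases h : pvCtx x = true <;>
          simp [h, List.countP_cons, hv] <;> omega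

-- membership in A's to_drop set, characterised by context rank
theorem pv_to_drop (xs : List (String × String × Bool)) (L R : Int) (j : Nat)
    (hj : j < xs.length) :
    ((PySem.List.pyRange 1 (min R ((pvCtxIdx 0 xs).length : Int) + 1)).foldl
        (fun s k => PySem.Set.add s (PySem.List.pyGetD (pvCtxIdx 0 xs) (-k) 0))
        ((PySem.List.pyRange 0 (min L ((pvCtxIdx 0 xs).length : Int))).foldl
          (fun s k => PySem.Set.add s (PySem.List.pyGetD (pvCtxIdx 0 xs) k 0))
          PySem.Set.empty)).contains ((0 : Int) + (j : Int)) = true ↔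
      (pvCtx (xs[j]'hj) = true ∧
        ¬ (min L (xs.countP pvCtx : Int) ≤ (0 : Int) + ((xs.take j).countP pvCtx : Int) ∧
           (0 : Int) + ((xs.take j).countP pvCtx : Int) <
             (xs.countP pvCtx : Int) - min R (xs.countP pvCtx : Int))) := by
  have hlen : (pvCtxIdx 0 xs).length = xs.countP pvCtx := pvCtxIdx_length xs 0
  rw [PySem.Set.contains_iff, PySem.Set.mem_foldl_add, PySem.Set.mem_foldl_add]
  constructor
  · rintro ((h | ⟨k, hk, hkv⟩) | ⟨k, hk, hkv⟩)
    · cases h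
    · -- dropped by the left loop: rank k < min L n
      rw [PySem.List.mem_pyRange_one] at hk
      have hkn : k < ((pvCtxIdx 0 xs).length : Int) := by omega
      rw [PySem.List.pyGetD_eq_getElem _ _ hk.1 hkn] at hkv
      obtain ⟨j', hj', hv, hc, hcnt⟩ := pvCtxIdx_of_rank xs 0 k.toNat (by omega)
      rw [List.getElem?_eq_getElem (by omega)] at hv
      have hvv : (pvCtxIdx 0 xs)[k.toNat]'(by omega) = (0 : Int) + (j' : Int) :=
        Option.some.inj hv
      have hjj : j = j' := by omega
      subst hjj
      refine ⟨hc, ?_⟩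
      omega
    · -- dropped by the right loop: rank ≥ n - min R n
      rw [PySem.List.mem_pyRange_one] at hk
      have hkN : k = (k.toNat : Int) := by omega
      rw [hkN, PySem.List.pyGetD_neg_natCast _ _ _ (by omega) (by omega)] at hkv
      obtain ⟨j', hj', hv, hc, hcnt⟩ :=
        pvCtxIdx_of_rank xs 0 ((pvCtxIdx 0 xs).length - k.toNat) (by omega)
      rw [List.getElem?_eq_getElem (by omega)] at hv
      have hvv : (pvCtxIdx 0 xs)[(pvCtxIdx 0 xs).length - k.toNat]'(by omega) =
          (0 : Int) + (j' : Int) := Option.some.inj hv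
      have hjj : j = j' := by omega
      subst hjj
      refine ⟨hc, ?_⟩
      omega
  · rintro ⟨hc, hcond⟩
    obtain ⟨hr, hv⟩ := pvCtxIdx_rank_of_idx xs 0 j hj hc
    rw [List.getElem?_eq_getElem hr] at hv
    have hvv := Option.some.inj hv
    by_cases hL : (((xs.take j).countP pvCtx : Nat) : Int) < min L ((xs.countP pvCtx : Nat) : Int)
    · refine Or.inl (Or.inr ⟨((xs.take j).countP pvCtx : Int), ?_, ?_⟩)
      · rw [PySem.List.mem_pyRange_one]; omega
      · rw [PySem.List.pyGetD_eq_getElem _ _ (by omega) (by omega)]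
        rw [← hvv]
        congr 1
    · refine Or.inr ⟨(((pvCtxIdx 0 xs).length - (xs.take j).countP pvCtx : Nat) : Int), ?_, ?_⟩
      · rw [PySem.List.mem_pyRange_one]; omega
      · rw [PySem.List.pyGetD_neg_natCast _ _ _ (by omega) (by omega)]
        rw [← hvv]
        congr 1
        omega

-- A's final comprehension, with P characterised by rank, is the rank filter
theorem pvA_filter (xs : List (String × String × Bool)) (lo hi : Int) (P : Int → Bool)
    (s r0 : Int)
    (H : ∀ (j : Nat) (hj : j < xs.length),
      P (s + (j : Int)) = true ↔ (pvCtx (xs[j]'hj) = true ∧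
        ¬ (lo ≤ r0 + ((xs.take j).countP pvCtx : Int) ∧ r0 + ((xs.take j).countP pvCtx : Int) < hi))) :
    ((PySem.List.enumerate xs s).filter (fun p => ! P p.1)).map (·.2) = pvRankFilter lo hi r0 xs := by
  induction xs generalizing s r0 with
  | nil => rfl
  | cons x xs ih =>
    have h0 := H 0 (by simp only [List.length_cons]; omega)
    simp only [List.getElem_cons_zero, List.take_zero, List.countP_nil, Nat.cast_zero,
      add_zero] at h0
    rw [PySem.List.enumerate_cons, List.filter_cons]
    by_cases hc : pvCtx x = true
    · have ih' := ih (s + 1) (r0 + 1) (fun j hj => by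
        have := H (j + 1) (by simp only [List.length_cons]; omega)
        simp only [List.getElem_cons_succ, List.take_succ_cons, List.countP_cons, hc,
          if_pos] at this ⊢
        convert this using 3 <;> push_cast <;> omega)
      by_cases hk : lo ≤ r0 ∧ r0 < hi
      · have hPs : P s = false := by
          cases hPs : P s with
          | false => rfl
          | true => exact absurd hk (h0.mp hPs).2
        simp [hPs, pvRankFilter, hc, hk, ih']
      · have hPs : P s = true := h0.mpr ⟨hc, hk⟩
        simp [hPs, pvRankFilter, hc, hk, ih']
    · have hPs : P s = false := by
        cases hPs : P s with
        | false => rfl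
        | true => exact absurd (h0.mp hPs).1 hc
      have ih' := ih (s + 1) r0 (fun j hj => by
        have := H (j + 1) (by simp only [List.length_cons]; omega)
        simp only [List.getElem_cons_succ, List.take_succ_cons, List.countP_cons, hc,
          Bool.false_eq_true, if_false, Nat.add_zero] at this ⊢
        convert this using 3 <;> push_cast <;> omega)
      simp [hPs, pvRankFilter, hc, ih']

-- B's fold computes the rank filter
theorem pvB_fold (xs : List (String × String × Bool)) (lo hi r : Int)
    (acc : List (String × String × Bool)) :
    (xs.foldl
      (fun (st : Int × List (String × String × Bool)) hl =>
        if hl.1 == " " then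
          (st.1 + 1, if lo ≤ st.1 ∧ st.1 < hi then st.2 ++ [hl] else st.2)
        else
          (st.1, st.2 ++ [hl]))
      (r, acc)).2 = acc ++ pvRankFilter lo hi r xs := by
  induction xs generalizing r acc with
  | nil => simp [pvRankFilter]
  | cons x xs ih =>
    rw [List.foldl_cons]
    by_cases hc : (x.1 == " ") = true
    · rw [if_pos hc]
      by_cases hk : lo ≤ r ∧ r < hi
      · rw [if_pos hk, ih]
        simp [pvRankFilter, pvCtx, hc, hk]
      · rw [if_neg hk, ih]
        simp [pvRankFilter, pvCtx, hc, hk]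
    · rw [if_neg hc, ih]
      simp [pvRankFilter, pvCtx, hc]

theorem pvB_count (xs : List (String × String × Bool)) (c : Int) :
    xs.foldl (fun c hl => if hl.1 == " " then c + 1 else c) c = c + (xs.countP pvCtx : Int) := by
  induction xs generalizing c with
  | nil => simp
  | cons x xs ih =>
    rw [List.foldl_cons]
    by_cases hc : (x.1 == " ") = true
    · rw [if_pos hc, ih]
      have h1 : List.countP pvCtx (x :: xs) = List.countP pvCtx xs + 1 := by
        simp [List.countP_cons, pvCtx, hc]
      rw [h1]; push_cast; ring
    · rw [if_neg hc, ih]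
      have h1 : List.countP pvCtx (x :: xs) = List.countP pvCtx xs := by
        simp [List.countP_cons, pvCtx, hc]
      rw [h1]

-- ===== VERDICT (by name: the statement is the Claim_ definition above) =====
theorem reduce_hunk_lines_spec : Claim_equal_reduce_hunk_lines := by
  unfold Claim_equal_reduce_hunk_lines
  intro xs L R _
  unfold Spec_reduce_hunk_lines reduce_hunk_lines reduce_hunk_lines_alt
  by_cases hz : L = 0 ∧ R = 0
  · simp [hz]
  · simp only [hz, if_false]
    rw [pvB_count, pvB_fold, List.nil_append]
    simp only [zero_add]
    exact pvA_filter xs _ _ _ 0 0 (fun j hj => pv_to_drop xs L R j hj)
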